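-- pv_equiv track=rewrite | github.com/yanvirin/material | summary_service/query_handlers/generic.py | create_extract_summary
-- ===== SOURCE A (Python) =====
-- import string
--
-- def create_extract_summary(indices, translation, summary_word_budget):
--
--     word_count = 0
--     summary_lines = []
--     if summary_word_budget == 0: return summary_lines
--
--     for index in indices:
--         summary_line = []
--         for token in translation[index]:
--             if is_punctuation(token):
--                 summary_line.append(token)
--             else:
--                 summary_line.append(token)
--                 word_count += 1
--                 if word_count == summary_word_budget:
--                     break
--         summary_lines.append(summary_line)
--         if word_count == summary_word_budget:
--             break
--
--     return summary_lines
--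
-- def is_punctuation(word):
--     for char in word:
--         if not char in string.punctuation:
--             return False
--     return True
-- ===== SOURCE B (Python) =====
-- import string
--
-- def _is_punct(tok):
--     return all(ch in string.punctuation for ch in tok)
--
-- def _take_words(line, k):
--     # keep tokens up to and including the k-th non-punctuation token
--     out = []
--     for t in line:
--         out.append(t)
--         if not _is_punct(t):
--             k -= 1
--             if k == 0:
--                 break
--     return out
--
-- def create_extract_summary(indices, translation, summary_word_budget):
--     if summary_word_budget == 0:
--         return []
--     out = []
--     cum = 0
--     for i in indices:
--         line = translation[i]
--         c = sum(1 for t in line if not _is_punct(t))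
--         if cum < summary_word_budget <= cum + c:
--             # the budget-th word falls inside this line: slice and stop
--             out.append(_take_words(line, summary_word_budget - cum))
--             return out
--         out.append(list(line))
--         cum += c
--     return out
-- ===== Notes on version B (the rewrite author's own statement) =====
-- stated objective: alternative
-- what changed: B precomputes each line's non-punctuation word count and walks a running cumulative total, appending whole lines and slicing the single line in which the budget-th word falls, instead of A's token-by-token mutable counter with nested breaks; lines are still looked up lazily, one per iteration, so B returns (and raises) exactly where A does.
import Mathlib
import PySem

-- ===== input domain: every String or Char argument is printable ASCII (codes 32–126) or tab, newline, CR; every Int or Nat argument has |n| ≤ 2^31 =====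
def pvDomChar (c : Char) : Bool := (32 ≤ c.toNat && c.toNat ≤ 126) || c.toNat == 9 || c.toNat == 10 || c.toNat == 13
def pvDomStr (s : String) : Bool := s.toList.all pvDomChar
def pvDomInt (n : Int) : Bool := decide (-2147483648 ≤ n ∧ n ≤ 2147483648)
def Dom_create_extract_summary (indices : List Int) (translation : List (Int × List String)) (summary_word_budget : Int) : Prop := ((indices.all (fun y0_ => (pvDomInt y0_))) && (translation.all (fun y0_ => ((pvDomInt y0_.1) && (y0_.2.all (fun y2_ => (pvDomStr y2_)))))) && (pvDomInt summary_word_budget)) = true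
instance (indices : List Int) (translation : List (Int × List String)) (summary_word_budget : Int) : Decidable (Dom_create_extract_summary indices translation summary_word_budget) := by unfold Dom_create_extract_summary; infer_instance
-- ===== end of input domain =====

-- B replaces A's token-by-token mutable word counter (nested loops with breaks) by a per-line
-- aggregate word count and a cumulative walk that appends whole lines and slices only the single
-- line in which the budget is reached (objective: alternative decomposition, same cost).

-- ===== PORT A =====
-- string.punctuation
def pvPunct : List Char := "!\"#$%&'()*+,-./:;<=>?@[\\]^_`{|}~".toList

-- is_punctuation: loop over chars, return False at the first char not in string.punctuation
def pvIsPunctuationA : List Char → Bool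
  | [] => true
  | c :: cs => if !(pvPunct.contains c) then false else pvIsPunctuationA cs

-- the inner 'for token in translation[index]' loop with its break; state = (summary_line, word_count)
def pvInnerA (budget : Int) : List String → List String → Int → List String × Int
  | [], line, wc => (line, wc)
  | t :: ts, line, wc =>
    if pvIsPunctuationA t.toList then pvInnerA budget ts (line ++ [t]) wc
    else if wc + 1 = budget then (line ++ [t], wc + 1)
    else pvInnerA budget ts (line ++ [t]) (wc + 1)

-- the outer 'for index in indices' loop with its break
-- (translation[index]: Python raises KeyError on a missing key; Pre_ excludes exactly the inputs
-- where the loop reaches a missing key, so the [] default is never the claimed value)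
def pvOuterA (d : PySem.Dict Int (List String)) (budget : Int) : List Int → Int → List (List String) → List (List String)
  | [], _, acc => acc
  | i :: is, wc, acc =>
    let r := pvInnerA budget (d.getD i []) [] wc
    if r.2 = budget then acc ++ [r.1]
    else pvOuterA d budget is r.2 (acc ++ [r.1])

def create_extract_summary (indices : List Int) (translation : List (Int × List String)) (summary_word_budget : Int) : List (List String) :=
  if summary_word_budget = 0 then []
  else pvOuterA (PySem.Dict.mk translation) summary_word_budget indices 0 []

-- ===== PORT B =====
-- _is_punct: all(ch in string.punctuation for ch in tok)
def pvIsPunctB (t : String) : Bool := t.toList.all (fun c => pvPunct.contains c)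

-- _take_words: keep tokens up to and including the k-th non-punctuation token
def pvTakeWords : List String → Int → List String
  | [], _ => []
  | t :: ts, k =>
    if pvIsPunctB t then t :: pvTakeWords ts k
    else if k - 1 = 0 then [t]
    else t :: pvTakeWords ts (k - 1)

-- c = sum(1 for t in line if not _is_punct(t))
def pvCountB (line : List String) : Int := ((line.filter (fun t => !pvIsPunctB t)).length : Int)

-- the lazy cumulative walk over indices: look a line up only when the walk reaches it
def pvWalkB (d : PySem.Dict Int (List String)) (budget : Int) : List Int → Int → List (List String)
  | [], _ => []
  | i :: is, cum =>
    let line := d.getD i []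
    let c := pvCountB line
    if cum < budget ∧ budget ≤ cum + c then [pvTakeWords line (budget - cum)]
    else line :: pvWalkB d budget is (cum + c)

def create_extract_summary_alt (indices : List Int) (translation : List (Int × List String)) (summary_word_budget : Int) : List (List String) :=
  if summary_word_budget = 0 then []
  else pvWalkB (PySem.Dict.mk translation) summary_word_budget indices 0

-- ===== PRECONDITION & SPEC =====
-- Pre_ excludes exactly the inputs on which Python A raises KeyError: a nonzero budget together
-- with an index missing from translation that the loop reaches before the budget is filled
-- (i.e. the non-punctuation words of the lines before the first missing index do not cover the
-- budget); B raises KeyError at the same point there.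
def Pre_create_extract_summary (indices : List Int) (translation : List (Int × List String)) (summary_word_budget : Int) : Prop :=
  summary_word_budget = 0 ∨
  (∀ i ∈ indices, (PySem.Dict.mk translation).contains i = true) ∨
  (0 < summary_word_budget ∧
    summary_word_budget ≤
      ((indices.takeWhile (fun i => (PySem.Dict.mk translation).contains i)).map
        (fun i => pvCountB ((PySem.Dict.mk translation).getD i []))).sum)
instance (indices : List Int) (translation : List (Int × List String)) (summary_word_budget : Int) : Decidable (Pre_create_extract_summary indices translation summary_word_budget) := by unfold Pre_create_extract_summary; infer_instance

def pvWitness_create_extract_summary : List Int × (List (Int × List String)) × Int := ([0], [((0 : Int), ["a", "b", "."])], 2)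

def Spec_create_extract_summary (indices : List Int) (translation : List (Int × List String)) (summary_word_budget : Int) (out : List (List String)) : Prop := out = create_extract_summary_alt indices translation summary_word_budget
instance (indices : List Int) (translation : List (Int × List String)) (summary_word_budget : Int) (out : List (List String)) : Decidable (Spec_create_extract_summary indices translation summary_word_budget out) := by unfold Spec_create_extract_summary; infer_instance

-- ===== CLAIM (what is proved, stated in full; the proofs are below) =====
def Claim_equal_create_extract_summary : Prop := ∀ (indices : List Int) (translation : List (Int × List String)) (summary_word_budget : Int), Dom_create_extract_summary indices translation summary_word_budget → Pre_create_extract_summary indices translation summary_word_budget → Spec_create_extract_summary indices translation summary_word_budget (create_extract_summary indices translation summary_word_budget)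

-- ===== LEMMAS AND PROOFS =====

theorem pvIsPunct_eq (cs : List Char) : pvIsPunctuationA cs = cs.all (fun c => pvPunct.contains c) := by
  induction cs with
  | nil => rfl
  | cons c cs ih =>
    simp only [pvIsPunctuationA, List.all_cons, ih]
    cases pvPunct.contains c <;> simp

theorem pvIsPunctA_eq_B (t : String) : pvIsPunctuationA t.toList = pvIsPunctB t := pvIsPunct_eq t.toList

theorem pvCountB_nonneg (l : List String) : 0 ≤ pvCountB l := by
  simp [pvCountB]

theorem pvCountB_cons (t : String) (ts : List String) :
    pvCountB (t :: ts) = if pvIsPunctB t then pvCountB ts else pvCountB ts + 1 := by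
  by_cases h : pvIsPunctB t
  · simp [pvCountB, h]
  · simp [pvCountB, h]

theorem pvInnerA_spec (budget : Int) (tokens : List String) :
    ∀ (acc : List String) (wc : Int), wc < budget →
    pvInnerA budget tokens acc wc =
      if wc + pvCountB tokens < budget then (acc ++ tokens, wc + pvCountB tokens)
      else (acc ++ pvTakeWords tokens (budget - wc), budget) := by
  induction tokens with
  | nil =>
    intro acc wc h
    simp only [pvInnerA, pvCountB, List.filter_nil, List.length_nil, Int.natCast_zero, add_zero]
    rw [if_pos h]; simp
  | cons t ts ih =>
    intro acc wc h
    by_cases hp : pvIsPunctB t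
    · have hstep : pvInnerA budget (t :: ts) acc wc = pvInnerA budget ts (acc ++ [t]) wc := by
        simp [pvInnerA, pvIsPunctA_eq_B, hp]
      rw [hstep, ih (acc ++ [t]) wc h]
      by_cases hc : wc + pvCountB ts < budget <;>
        simp [pvCountB_cons, hp, pvTakeWords, hc]
    · have hcn := pvCountB_nonneg ts
      by_cases he : wc + 1 = budget
      · have hnc : ¬ wc + pvCountB (t :: ts) < budget := by
          rw [pvCountB_cons, if_neg hp]; omega
        rw [if_neg hnc]
        have h1 : budget - wc - 1 = 0 := by omega
        simp only [pvTakeWords, if_neg hp, if_pos h1, pvInnerA, pvIsPunctA_eq_B, if_pos he]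
        simp [he]
      · have h2 : wc + 1 < budget := by omega
        simp only [pvInnerA, pvIsPunctA_eq_B, if_neg hp, if_neg he]
        rw [ih (acc ++ [t]) (wc + 1) h2]
        have h1 : ¬ budget - wc - 1 = 0 := by omega
        rw [pvCountB_cons, if_neg hp]
        by_cases hc : wc + 1 + pvCountB ts < budget
        · rw [if_pos hc, if_pos (show wc + (pvCountB ts + 1) < budget by omega)]
          simp only [Prod.mk.injEq]
          exact ⟨by simp, by omega⟩
        · rw [if_neg hc, if_neg (show ¬ wc + (pvCountB ts + 1) < budget by omega)]
          simp only [pvTakeWords, if_neg hp, if_neg h1]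
          have h3 : budget - (wc + 1) = budget - wc - 1 := by omega
          simp [h3]

theorem pvInnerA_neg (budget : Int) (hb : budget ≤ 0) (tokens : List String) :
    ∀ (acc : List String) (wc : Int), 0 ≤ wc →
    pvInnerA budget tokens acc wc = (acc ++ tokens, wc + pvCountB tokens) := by
  induction tokens with
  | nil => intro acc wc _; simp [pvInnerA, pvCountB]
  | cons t ts ih =>
    intro acc wc hw
    by_cases hp : pvIsPunctB t
    · simp only [pvInnerA, pvIsPunctA_eq_B, if_pos hp]
      rw [ih (acc ++ [t]) wc hw, pvCountB_cons, if_pos hp]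
      simp
    · simp only [pvInnerA, pvIsPunctA_eq_B, if_neg hp,
        if_neg (show ¬ wc + 1 = budget by omega)]
      rw [ih (acc ++ [t]) (wc + 1) (by omega), pvCountB_cons, if_neg hp]
      simp only [Prod.mk.injEq]
      exact ⟨by simp, by omega⟩

theorem pvOuterA_neg (d : PySem.Dict Int (List String)) (budget : Int) (hb : budget < 0) (is : List Int) :
    ∀ (wc : Int) (acc : List (List String)), 0 ≤ wc →
    pvOuterA d budget is wc acc = acc ++ is.map (fun i => d.getD i []) := by
  induction is with
  | nil => intro wc acc _; simp [pvOuterA]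
  | cons i is ih =>
    intro wc acc hw
    simp only [pvOuterA]
    rw [pvInnerA_neg budget (by omega) (d.getD i []) [] wc hw]
    have hcn := pvCountB_nonneg (d.getD i [])
    rw [if_neg (show ¬ wc + pvCountB (d.getD i []) = budget by omega)]
    rw [ih (wc + pvCountB (d.getD i [])) _ (by omega)]
    simp

theorem pvWalkB_neg (d : PySem.Dict Int (List String)) (budget : Int) (hb : budget ≤ 0) (is : List Int) :
    ∀ (cum : Int), 0 ≤ cum →
    pvWalkB d budget is cum = is.map (fun i => d.getD i []) := by
  induction is with
  | nil => intro cum _; simp [pvWalkB]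
  | cons i is ih =>
    intro cum hc
    have hcn := pvCountB_nonneg (d.getD i [])
    simp only [pvWalkB, List.map_cons]
    rw [if_neg (by omega), ih (cum + pvCountB (d.getD i [])) (by omega)]

theorem pvOuterA_spec (d : PySem.Dict Int (List String)) (budget : Int) (is : List Int) :
    ∀ (wc : Int) (acc : List (List String)), wc < budget →
    pvOuterA d budget is wc acc = acc ++ pvWalkB d budget is wc := by
  induction is with
  | nil => intro wc acc _; simp [pvOuterA, pvWalkB]
  | cons i is ih =>
    intro wc acc h
    simp only [pvOuterA, pvWalkB]
    rw [pvInnerA_spec budget (d.getD i []) [] wc h]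
    by_cases hc : wc + pvCountB (d.getD i []) < budget
    · rw [if_pos hc]
      rw [if_neg (by omega : ¬ (wc < budget ∧ budget ≤ wc + pvCountB (d.getD i [])))]
      have hne : ¬ (([] : List String) ++ d.getD i [], wc + pvCountB (d.getD i [])).2 = budget := by
        simp; omega
      rw [if_neg hne, ih (wc + pvCountB (d.getD i [])) (acc ++ [([] : List String) ++ d.getD i []]) (by omega)]
      simp
    · rw [if_neg hc]
      rw [if_pos (show wc < budget ∧ budget ≤ wc + pvCountB (d.getD i []) by omega)]
      simp

-- ===== VERDICT (by name: the statement is the Claim_ definition above) =====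
theorem create_extract_summary_spec : Claim_equal_create_extract_summary := by
  intro indices translation budget _ _
  unfold Spec_create_extract_summary create_extract_summary create_extract_summary_alt
  by_cases h0 : budget = 0
  · simp [h0]
  · rw [if_neg h0, if_neg h0]
    by_cases hpos : 0 < budget
    · rw [pvOuterA_spec _ _ _ 0 [] hpos]
      simp
    · have hneg : budget < 0 := by omega
      rw [pvOuterA_neg _ _ hneg _ 0 [] le_rfl,
          pvWalkB_neg _ budget (by omega) _ 0 le_rfl]
      simp
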